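-- pv_equiv track=rewrite | github.com/VTU-CS-LAB/Design-and-Analysis-of-Algorithm-Laboratory-Simulation | 2/mergesort.py | worstCaseArray
-- ===== SOURCE A (Python) =====
-- def worstCaseArray(n):
--     arr = [i for i in range(n)]
--     def generate(li, l, h):
--         if l < h:
--             mid = (l + h) // 2
--             partition(li, l, h)
--             generate(li, l, mid)
--             generate(li, mid + 1, h)
--     def partition(li, l, h):
--         n = h - l + 1
--         k = 0
--         t = []
--         for i in range(l, h + 1, 2):
--             t.append(li[i])
--         for i in range(l + 1, h + 1, 2):
--             t.append(li[i])
--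
--         for i in range(l, n):
--             li[l + i] = t[i]
--     generate(arr, 0, len(arr) - 1)
--     return arr
-- ===== SOURCE B (Python) =====
-- def worstCaseArray(n):
--     arr = list(range(n))
--     stack = [(0, len(arr) - 1)]
--     while stack:
--         l, h = stack.pop()
--         if l < h:
--             mid = (l + h) // 2
--             m = h - l + 1
--             t = [arr[i] for i in range(l, h + 1, 2)] + [arr[i] for i in range(l + 1, h + 1, 2)]
--             for i in range(l, m):
--                 arr[l + i] = t[i]
--             stack.append((mid + 1, h))
--             stack.append((l, mid))
--     return arr
-- ===== Notes on version B (the rewrite author's own statement) =====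
-- stated objective: alternative
-- what changed: The recursive generate is replaced by an explicit stack of (l,h) intervals popped in pre-order (right half pushed first), performing the identical in-place mutation sequence without recursion; t is built by comprehensions instead of append loops.
import Mathlib
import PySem

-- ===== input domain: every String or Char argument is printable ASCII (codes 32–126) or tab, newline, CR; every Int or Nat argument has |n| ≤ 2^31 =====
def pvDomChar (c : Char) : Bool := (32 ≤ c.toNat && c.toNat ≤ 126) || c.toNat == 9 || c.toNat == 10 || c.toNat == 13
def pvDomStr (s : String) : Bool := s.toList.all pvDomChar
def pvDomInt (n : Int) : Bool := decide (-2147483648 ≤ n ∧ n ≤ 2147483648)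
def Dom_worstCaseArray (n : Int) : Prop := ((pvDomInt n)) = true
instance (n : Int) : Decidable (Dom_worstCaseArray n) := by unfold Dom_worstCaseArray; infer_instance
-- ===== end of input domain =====

-- B replaces A's recursive `generate` by an explicit stack of (l,h) intervals popped in
-- pre-order (objective: alternative, same mutation sequence, no recursion).

-- li[i] read / li[i] = v write; exact for 0 ≤ i < li.length, the only indices the
-- functions below ever use (all loop indices here stay inside [0, len)).
def pvGet (li : List Int) (i : Int) : Int := li.getD i.toNat 0
def pvSet (li : List Int) (i : Int) (v : Int) : List Int := li.set i.toNat v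

-- mid = (l+h)//2 lies in [l, h) when l < h (used for termination of both ports)
theorem pvMid_bounds {l h : Int} (hlh : l < h) :
    l ≤ PySem.Int.floordiv (l + h) 2 ∧ PySem.Int.floordiv (l + h) 2 < h := by
  rw [PySem.Int.floordiv_eq_ediv_of_pos (by omega)]
  omega

-- ===== PORT A =====
-- A's inner `partition` verbatim: shadowed n = h-l+1, t built by two append loops,
-- then the write-back over range(l, n)
def pyPartitionA (li : List Int) (l h : Int) : List Int :=
  let n := h - l + 1
  let t := (PySem.List.pyRange l (h + 1) 2).foldl (fun t i => t ++ [pvGet li i]) []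
  let t := (PySem.List.pyRange (l + 1) (h + 1) 2).foldl (fun t i => t ++ [pvGet li i]) t
  (PySem.List.pyRange l n 1).foldl (fun a i => pvSet a (l + i) (pvGet t i)) li

-- A's recursive `generate`
def pyGenerate (li : List Int) (l h : Int) : List Int :=
  if _hl : l < h then
    let mid := PySem.Int.floordiv (l + h) 2
    let li1 := pyPartitionA li l h
    let li2 := pyGenerate li1 l mid
    pyGenerate li2 (mid + 1) h
  else li
termination_by (h - l).toNat
decreasing_by
  · have := pvMid_bounds _hl; omega
  · have := pvMid_bounds _hl; omega

def worstCaseArray (n : Int) : List Int :=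
  let arr := PySem.List.pyRange 0 n 1
  pyGenerate arr 0 ((arr.length : Int) - 1)

-- ===== PORT B =====
-- termination measure for the while-loop: each interval of size s contributes 2s+1
def pvStackMeasure : List (Int × Int) → Nat
  | [] => 0
  | (l, h) :: rest => (2 * (h - l).toNat + 1) + pvStackMeasure rest

-- Source B's while-loop: pop (l,h); if l < h mutate arr in place (t by two comprehensions,
-- then the write-back), push (mid+1,h) then (l,mid)
def pyLoop (arr : List Int) (stack : List (Int × Int)) : List Int :=
  match stack with
  | [] => arr
  | (l, h) :: rest =>
    if _hl : l < h then
      let mid := PySem.Int.floordiv (l + h) 2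
      let m := h - l + 1
      let t := (PySem.List.pyRange l (h + 1) 2).map (pvGet arr) ++
               (PySem.List.pyRange (l + 1) (h + 1) 2).map (pvGet arr)
      let arr' := (PySem.List.pyRange l m 1).foldl (fun a i => pvSet a (l + i) (pvGet t i)) arr
      pyLoop arr' ((l, mid) :: (mid + 1, h) :: rest)
    else pyLoop arr rest
termination_by pvStackMeasure stack
decreasing_by
  · have := pvMid_bounds _hl; simp [pvStackMeasure]; omega
  · simp [pvStackMeasure]

def worstCaseArray_alt (n : Int) : List Int :=
  let arr := PySem.List.pyRange 0 n 1
  pyLoop arr [(0, (arr.length : Int) - 1)]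

-- ===== PRECONDITION & SPEC =====
def Spec_worstCaseArray (n : Int) (out : List Int) : Prop := out = worstCaseArray_alt n
instance (n : Int) (out : List Int) : Decidable (Spec_worstCaseArray n out) := by unfold Spec_worstCaseArray; infer_instance

-- ===== CLAIM (what is proved, stated in full; the proofs are below) =====
def Claim_equal_worstCaseArray : Prop := ∀ (n : Int), Dom_worstCaseArray n → Spec_worstCaseArray n (worstCaseArray n)

-- ===== LEMMAS AND PROOFS =====
theorem pvFoldl_append (xs : List Int) (f : Int → Int) (acc : List Int) :
    xs.foldl (fun t i => t ++ [f i]) acc = acc ++ xs.map f := by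
  induction xs generalizing acc with
  | nil => simp
  | cons x xs ih => simp [List.foldl, ih]

-- A's two append loops build the same t as B's concatenated comprehensions,
-- hence the partition bodies agree
theorem pvPartition_eq (li : List Int) (l h : Int) :
    pyPartitionA li l h =
      (PySem.List.pyRange l (h - l + 1) 1).foldl
        (fun a i => pvSet a (l + i)
          (pvGet ((PySem.List.pyRange l (h + 1) 2).map (pvGet li) ++
                  (PySem.List.pyRange (l + 1) (h + 1) 2).map (pvGet li)) i)) li := by
  unfold pyPartitionA
  simp only [pvFoldl_append, List.nil_append]

theorem pvLoop_cons (k : Nat) :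
    ∀ (l h : Int), (h - l).toNat = k → ∀ (arr : List Int) (rest : List (Int × Int)),
      pyLoop arr ((l, h) :: rest) = pyLoop (pyGenerate arr l h) rest := by
  induction k using Nat.strong_induction_on with
  | _ k ih =>
    intro l h hk arr rest
    rw [pyLoop, pyGenerate]
    by_cases hlh : l < h
    · simp only [hlh, dif_pos]
      have hb := pvMid_bounds hlh
      rw [ih ((PySem.Int.floordiv (l + h) 2) - l).toNat (by omega) _ _ rfl,
          ih (h - (PySem.Int.floordiv (l + h) 2 + 1)).toNat (by omega) _ _ rfl]
      rw [pvPartition_eq]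
    · simp only [hlh, dif_neg, not_false_iff]

-- ===== VERDICT (by name: the statement is the Claim_ definition above) =====
theorem worstCaseArray_spec : Claim_equal_worstCaseArray := by
  intro n _
  unfold Spec_worstCaseArray worstCaseArray worstCaseArray_alt
  rw [pvLoop_cons _ _ _ rfl, pyLoop]
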